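-- pv_equiv track=rewrite | github.com/jayowen/sermonsearch | utils/command_parser.py | extract_time_segments
-- ===== SOURCE A (Python) =====
-- from typing import Dict, Callable, List, Tuple, Optional
--
-- def extract_time_segments(transcript_text: str, segment_length: int = 300) -> List[str]:
--     """Split transcript into time-based segments."""
--     words = transcript_text.split()
--     segments = []
--     current_segment = []
--     word_count = 0
--
--     for word in words:
--         current_segment.append(word)
--         word_count += 1
--
--         if word_count >= segment_length:
--             segments.append(" ".join(current_segment))
--             current_segment = []
--             word_count = 0
--
--     if current_segment:
--         segments.append(" ".join(current_segment))
--
--     return segments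
-- ===== SOURCE B (Python) =====
-- def extract_time_segments(transcript_text: str, segment_length: int = 300):
--     """Split transcript into time-based segments."""
--     words = transcript_text.split()
--     return [" ".join(words[i:i + segment_length])
--             for i in range(0, len(words), segment_length)]
-- ===== Notes on version B (the rewrite author's own statement) =====
-- stated objective: idiomatic
-- what changed: Replaces the per-word append/counter/flush accumulator loop with a comprehension that strides over index positions and joins each slice words[i:i+segment_length].
-- outside the precondition, e.g. on extract_time_segments('a b', 0): A returns ['a', 'b'], B raises ValueError; on extract_time_segments('a b', -3): A returns ['a', 'b'], B returns []
import Mathlib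
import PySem

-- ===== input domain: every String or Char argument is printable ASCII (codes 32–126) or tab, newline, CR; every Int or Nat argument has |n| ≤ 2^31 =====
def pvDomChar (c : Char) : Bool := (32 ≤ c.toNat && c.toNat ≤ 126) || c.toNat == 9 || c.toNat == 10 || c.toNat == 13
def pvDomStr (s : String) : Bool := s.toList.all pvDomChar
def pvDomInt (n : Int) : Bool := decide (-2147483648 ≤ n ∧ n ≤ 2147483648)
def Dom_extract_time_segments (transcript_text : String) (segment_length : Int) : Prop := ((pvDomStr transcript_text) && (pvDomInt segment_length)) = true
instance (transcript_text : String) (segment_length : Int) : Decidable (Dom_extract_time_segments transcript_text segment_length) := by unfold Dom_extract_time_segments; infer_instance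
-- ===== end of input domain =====

-- B is an idiomatic re-implementation: a comprehension striding over index positions and
-- joining each slice, instead of A's per-word append/counter/flush accumulator loop.

-- ===== PORT A =====
-- loop body of A's for-loop: state = (segments, current_segment, word_count)
def stepA (L : Int) (st : List String × List String × Int) (w : String) :
    List String × List String × Int :=
  let cur := st.2.1 ++ [w]
  let cnt := st.2.2 + 1
  if L ≤ cnt then (st.1 ++ [PySem.Str.join " " cur], [], 0) else (st.1, cur, cnt)

def extract_time_segments (transcript_text : String) (segment_length : Int) : List String :=
  let words := PySem.Str.split₀ transcript_text
  let r := words.foldl (stepA segment_length) ([], [], 0)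
  if r.2.1 ≠ [] then r.1 ++ [PySem.Str.join " " r.2.1] else r.1

-- ===== PORT B =====
def extract_time_segments_alt (transcript_text : String) (segment_length : Int) : List String :=
  let words := PySem.Str.split₀ transcript_text
  (PySem.List.pyRange 0 (words.length : Int) segment_length).map
    (fun i => PySem.Str.join " " (PySem.List.slice words (some i) (some (i + segment_length))))

-- ===== PRECONDITION & SPEC =====
-- Pre_ excludes non-positive segment_length on inputs with at least one word (plus step 0 always),
-- a nonsensical request on which no behaviour is specified: A happens to emit each word as its own
-- segment (the counter meets the threshold immediately), while B raises ValueError for step 0 and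
-- returns [] for a negative step; a wordless transcript with negative step stays inside (both []).
def Pre_extract_time_segments (transcript_text : String) (segment_length : Int) : Prop :=
  1 ≤ segment_length ∨ (segment_length < 0 ∧ PySem.Str.split₀ transcript_text = [])
instance (transcript_text : String) (segment_length : Int) : Decidable (Pre_extract_time_segments transcript_text segment_length) := by unfold Pre_extract_time_segments; infer_instance
def pvWitness_extract_time_segments : String × Int := ("a b c", 2)

def Spec_extract_time_segments (transcript_text : String) (segment_length : Int) (out : List String) : Prop := out = extract_time_segments_alt transcript_text segment_length
instance (transcript_text : String) (segment_length : Int) (out : List String) : Decidable (Spec_extract_time_segments transcript_text segment_length out) := by unfold Spec_extract_time_segments; infer_instance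

-- ===== CLAIM (what is proved, stated in full; the proofs are below) =====
def Claim_equal_extract_time_segments : Prop := ∀ (transcript_text : String) (segment_length : Int), Dom_extract_time_segments transcript_text segment_length → Pre_extract_time_segments transcript_text segment_length → Spec_extract_time_segments transcript_text segment_length (extract_time_segments transcript_text segment_length)

-- ===== LEMMAS AND PROOFS =====

-- chunks of size s+1 (parameterised so the step is positive by construction)
def chunks (s : Nat) : List String → List (List String)
  | [] => []
  | x :: xs => ((x :: xs).take (s + 1)) :: chunks s (xs.drop s)
termination_by l => l.length
decreasing_by simp

lemma chunks_nil (s : Nat) : chunks s [] = [] := by simp [chunks]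

lemma chunks_cons (s : Nat) (w : String) (ws : List String) :
    chunks s (w :: ws) = ((w :: ws).take (s + 1)) :: chunks s (ws.drop s) := by
  simp [chunks]

lemma stepA_lt (L : Int) (segs cur : List String) (c : Int) (w : String)
    (h : ¬ L ≤ c + 1) : stepA L (segs, cur, c) w = (segs, cur ++ [w], c + 1) := by
  simp only [stepA]; rw [if_neg h]

lemma stepA_ge (L : Int) (segs cur : List String) (c : Int) (w : String)
    (h : L ≤ c + 1) :
    stepA L (segs, cur, c) w = (segs ++ [PySem.Str.join " " (cur ++ [w])], [], 0) := by
  simp only [stepA]; rw [if_pos h]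

-- A's loop just accumulates while fewer than L words are pending
lemma fillA (L : Int) (ws : List String) :
    ∀ (cur segs : List String) (c : Int), c = (cur.length : Int) →
    c + ws.length < L →
    ws.foldl (stepA L) (segs, cur, c) = (segs, cur ++ ws, c + ws.length) := by
  induction ws with
  | nil => intro cur segs c _ _; simp
  | cons w ws ih =>
    intro cur segs c hc h
    simp only [List.length_cons] at h
    have hlt : ¬ L ≤ c + 1 := by push_cast at h; omega
    rw [List.foldl_cons, stepA_lt L segs cur c w hlt,
      ih (cur ++ [w]) segs (c + 1) (by simp [hc]) (by push_cast at h ⊢; omega)]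
    simp only [List.append_assoc, List.singleton_append, List.length_cons, Prod.mk.injEq,
      true_and]
    omega

-- A's loop flushes exactly when the pending words reach L
lemma flushA (L : Int) (ws : List String) :
    ∀ (cur segs : List String) (c : Int), c = (cur.length : Int) → ws ≠ [] →
    c + ws.length = L →
    ws.foldl (stepA L) (segs, cur, c) = (segs ++ [PySem.Str.join " " (cur ++ ws)], [], 0) := by
  induction ws with
  | nil => intro _ _ _ _ hne _; exact absurd rfl hne
  | cons w ws ih =>
    intro cur segs c hc _ h
    simp only [List.length_cons] at h
    cases ws with
    | nil =>
      have hle : L ≤ c + 1 := by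
        simp only [List.length_nil] at h; push_cast at h; omega
      rw [List.foldl_cons, stepA_ge L segs cur c w hle, List.foldl_nil]
    | cons w2 ws' =>
      have hlt : ¬ L ≤ c + 1 := by
        simp only [List.length_cons] at h; push_cast at h; omega
      rw [List.foldl_cons, stepA_lt L segs cur c w hlt,
        ih (cur ++ [w]) segs (c + 1) (by simp [hc]) (by simp)
          (by simp only [List.length_cons] at h ⊢; push_cast at h ⊢; omega),
        List.append_assoc, List.singleton_append]

-- A's whole loop + final flush computes the joined chunks
lemma loopA (S : Nat) :
    ∀ (n : Nat) (words : List String), words.length = n → ∀ (segs : List String),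
    (let r := words.foldl (stepA ((S : Int) + 1)) (segs, [], 0)
     if r.2.1 ≠ [] then r.1 ++ [PySem.Str.join " " r.2.1] else r.1)
      = segs ++ (chunks S words).map (PySem.Str.join " ") := by
  intro n
  induction n using Nat.strong_induction_on with
  | _ n ih =>
    intro words hlen segs
    cases words with
    | nil => simp [chunks_nil]
    | cons w ws =>
      by_cases hsmall : (((w :: ws).length : Int)) < (S : Int) + 1
      · have hfill := fillA ((S : Int) + 1) (w :: ws) [] segs 0 (by simp)
          (by omega)
        rw [hfill]
        have htake : (w :: ws).take (S + 1) = w :: ws :=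
          List.take_of_length_le (by simp only [List.length_cons] at hsmall ⊢; omega)
        have hdrop : ws.drop S = [] :=
          List.drop_eq_nil_of_le (by simp only [List.length_cons] at hsmall; omega)
        simp [chunks_cons, htake, hdrop, chunks_nil]
      · -- at least S+1 words: flush the first chunk, recurse on the rest
        have hge : S + 1 ≤ (w :: ws).length := by
          simp only [List.length_cons] at hsmall ⊢; push_cast at hsmall; omega
        set t := (w :: ws).take (S + 1) with ht
        set d := (w :: ws).drop (S + 1) with hd
        have hsplit : w :: ws = t ++ d := (List.take_append_drop _ _).symm
        have htlen : (t.length : Int) = (S : Int) + 1 := by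
          rw [ht, List.length_take]; push_cast; omega
        have htne : t ≠ [] := by
          intro hc; rw [hc] at htlen; simp at htlen; omega
        have hflush := flushA ((S : Int) + 1) t [] segs 0 (by simp) htne (by omega)
        simp only [List.nil_append] at hflush
        have hdl : d.length < n := by
          rw [hd, List.length_drop, ← hlen]; simp only [List.length_cons] at hge ⊢; omega
        have hrec := ih d.length hdl d rfl (segs ++ [PySem.Str.join " " t])
        calc (let r := (w :: ws).foldl (stepA ((S : Int) + 1)) (segs, [], 0)
              if r.2.1 ≠ [] then r.1 ++ [PySem.Str.join " " r.2.1] else r.1)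
            = (let r := d.foldl (stepA ((S : Int) + 1))
                  (segs ++ [PySem.Str.join " " t], [], 0)
               if r.2.1 ≠ [] then r.1 ++ [PySem.Str.join " " r.2.1] else r.1) := by
              conv_lhs => rw [hsplit]
              rw [List.foldl_append, hflush]
          _ = segs ++ [PySem.Str.join " " t] ++ (chunks S d).map (PySem.Str.join " ") := hrec
          _ = segs ++ (chunks S (w :: ws)).map (PySem.Str.join " ") := by
              rw [chunks_cons]
              have : ws.drop S = d := by rw [hd]; rfl
              rw [this, List.map_cons, List.append_assoc, ← ht]
              rfl

-- the slice words[L*k : L*k+L] is the k-th chunk window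
lemma sliceChunk (S : Nat) (words : List String) (k : Nat) :
    PySem.List.slice words (some (((S : Int) + 1) * k))
        (some (((S : Int) + 1) * k + ((S : Int) + 1)))
      = (words.drop ((S + 1) * k)).take (S + 1) := by
  have h1 : ((S : Int) + 1) * k = (((S + 1) * k : Nat) : Int) := by push_cast; ring
  have h2 : ((S : Int) + 1) * k + ((S : Int) + 1)
      = (((S + 1) * k + (S + 1) : Nat) : Int) := by push_cast; ring
  rw [h2, h1, PySem.List.slice_natCast]
  congr 1
  omega

-- the count of strides equals one plus the count for the tail beyond the first chunk
lemma strideCount (S : Nat) (n : Nat) (hn : 0 < n) :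
    ((((n : Int) + ((S : Int) + 1) - 1) / ((S : Int) + 1)).toNat)
      = (if 0 < n - (S + 1) then
           ((((n - (S + 1) : Nat) : Int) + ((S : Int) + 1) - 1) / ((S : Int) + 1)).toNat
         else 0) + 1 := by
  set L : Int := (S : Int) + 1 with hL
  have hLpos : 0 < L := by positivity
  by_cases hbig : S + 1 < n
  · have hcast : ((n - (S + 1) : Nat) : Int) = (n : Int) - L := by
      rw [hL]; push_cast [Nat.cast_sub (le_of_lt hbig)]; ring
    rw [if_pos (by omega), hcast]
    have harith : (n : Int) + L - 1 = ((n : Int) - L + L - 1) + 1 * L := by ring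
    rw [harith, Int.add_mul_ediv_right _ _ (ne_of_gt hLpos)]
    have hq : 0 ≤ ((n : Int) - L + L - 1) / L :=
      Int.ediv_nonneg (by omega) (le_of_lt hLpos)
    omega
  · rw [if_neg (by omega)]
    have ha : (n : Int) + L - 1 = ((n : Int) - 1) + 1 * L := by ring
    rw [ha, Int.add_mul_ediv_right _ _ (ne_of_gt hLpos)]
    have hz : ((n : Int) - 1) / L = 0 := by
      apply Int.ediv_eq_zero_of_lt (by omega)
      have : (n : Int) ≤ L := by rw [hL]; omega
      omega
    omega

-- B's strided comprehension computes the joined chunks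
lemma loopB (S : Nat) :
    ∀ (n : Nat) (words : List String), words.length = n →
    (PySem.List.pyRange 0 (words.length : Int) ((S : Int) + 1)).map
        (fun i => PySem.Str.join " "
          (PySem.List.slice words (some i) (some (i + ((S : Int) + 1)))))
      = (chunks S words).map (PySem.Str.join " ") := by
  intro n
  induction n using Nat.strong_induction_on with
  | _ n ih =>
    intro words hlen
    have hLpos : (0 : Int) < (S : Int) + 1 := by positivity
    cases words with
    | nil => rw [PySem.List.pyRange_of_pos _ _ hLpos]; simp [chunks_nil]
    | cons w ws =>
      have hn : 0 < (w :: ws).length := by simp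
      rw [PySem.List.pyRange_of_pos _ _ hLpos, if_pos (by exact_mod_cast hn), List.map_map]
      have hcount := strideCount S (w :: ws).length hn
      simp only [zero_add, sub_zero] at hcount ⊢
      rw [hcount, List.range_succ_eq_map, List.map_cons, List.map_map]
      set d := (w :: ws).drop (S + 1) with hd
      have hdeq : ws.drop S = d := by rw [hd]; rfl
      have hdlen : d.length = (w :: ws).length - (S + 1) := by rw [hd, List.length_drop]
      have hdlt : d.length < n := by
        rw [hdlen, ← hlen]; simp only [List.length_cons]; omega
      have hrec := ih d.length hdlt d rfl
      rw [PySem.List.pyRange_of_pos _ _ hLpos, List.map_map] at hrec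
      simp only [zero_add, sub_zero] at hrec
      have hif : (if (0 : Int) < (d.length : Int) then
            (((d.length : Int) + ((S : Int) + 1) - 1) / ((S : Int) + 1)).toNat else 0)
          = (if 0 < (w :: ws).length - (S + 1) then
              (((((w :: ws).length - (S + 1) : Nat) : Int) + ((S : Int) + 1) - 1)
                / ((S : Int) + 1)).toNat
            else 0) := by
        rw [← hdlen]
        by_cases hpos : 0 < d.length
        · rw [if_pos (by exact_mod_cast hpos), if_pos hpos]
        · rw [if_neg (by exact_mod_cast hpos), if_neg hpos]
      rw [hif] at hrec
      rw [chunks_cons, hdeq, List.map_cons]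
      congr 1
      · -- head: slice words[0 : 0+L] is the first S+1 words
        simp only [Function.comp_apply]
        rw [sliceChunk S (w :: ws) 0]
        simp
      · -- tail: shift every stride by one chunk
        rw [← hrec]
        apply List.map_congr_left
        intro k _
        simp only [Function.comp_apply, Function.comp_def, Nat.succ_eq_add_one]
        congr 1
        rw [sliceChunk, sliceChunk, hd, List.drop_drop]
        congr 2
        ring

-- ===== VERDICT (by name: the statement is the Claim_ definition above) =====
theorem extract_time_segments_spec : Claim_equal_extract_time_segments := by
  intro transcript_text segment_length _ hpre
  unfold Pre_extract_time_segments at hpre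
  unfold Spec_extract_time_segments
  rcases hpre with hpre | ⟨-, hemp⟩
  case inr =>
    unfold extract_time_segments extract_time_segments_alt
    rw [hemp]
    simp [PySem.List.pyRange]
  obtain ⟨S, hS⟩ : ∃ S : Nat, segment_length = (S : Int) + 1 :=
    ⟨(segment_length - 1).toNat, by omega⟩
  subst hS
  unfold extract_time_segments extract_time_segments_alt
  have hA := loopA S (PySem.Str.split₀ transcript_text).length
    (PySem.Str.split₀ transcript_text) rfl []
  have hB := loopB S (PySem.Str.split₀ transcript_text).length
    (PySem.Str.split₀ transcript_text) rfl
  simp only [List.nil_append] at hA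
  exact hA.trans hB.symm
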